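-- pv_equiv track=rewrite | github.com/rajatjc/Concordia | Fall22/6231DSD/Lab/Assignments/Assignment2/implementation/Q2/T1.py | distribute_rows
-- ===== SOURCE A (Python) =====
-- def distribute_rows(n_rows: int, n_threads):
--     reading_info = []
--     skip_rows = 1
--     reading_info.append([n_rows - skip_rows, skip_rows])
--     skip_rows = n_rows
--
--     for _ in range(1, n_threads - 1):
--         reading_info.append([n_rows, skip_rows])
--         skip_rows = skip_rows + n_rows
--
--     reading_info.append([None, skip_rows])
--     return reading_info
-- ===== SOURCE B (Python) =====
-- def distribute_rows(n_rows: int, n_threads):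
--     # build the result back-to-front: start from the terminal chunk (whose skip
--     # is known closed-form), walk the offsets DOWNWARDS by subtraction, reverse.
--     t = max(n_threads - 1, 1)
--     skip = n_rows * t
--     out = [[None, skip]]
--     while t > 1:
--         skip -= n_rows
--         out.append([n_rows, skip])
--         t -= 1
--     out.append([n_rows - 1, 1])
--     out.reverse()
--     return out
-- ===== Notes on version B (the rewrite author's own statement) =====
-- stated objective: alternative
-- what changed: B builds the list back-to-front: it computes the terminal skip closed-form, walks the offsets downwards by repeated subtraction in a countdown while-loop, and reverses at the end, instead of A's forward pass with an increasing accumulator.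
import Mathlib
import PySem

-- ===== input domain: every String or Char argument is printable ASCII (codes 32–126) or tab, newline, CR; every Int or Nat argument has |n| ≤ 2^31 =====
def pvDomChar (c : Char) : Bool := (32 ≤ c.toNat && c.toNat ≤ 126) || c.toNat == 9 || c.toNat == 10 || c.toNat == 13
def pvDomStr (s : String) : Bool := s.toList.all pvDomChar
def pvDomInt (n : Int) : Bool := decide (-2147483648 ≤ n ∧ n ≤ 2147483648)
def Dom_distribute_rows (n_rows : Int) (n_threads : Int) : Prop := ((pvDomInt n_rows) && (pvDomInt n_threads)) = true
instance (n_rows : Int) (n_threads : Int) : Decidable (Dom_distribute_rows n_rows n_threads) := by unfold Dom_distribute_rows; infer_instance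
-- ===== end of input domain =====

-- B builds the output back-to-front (terminal skip closed-form, countdown loop subtracting n_rows, final reverse); alternative decomposition, same cost.


-- ===== PORT A =====
-- literal port: reading_info/skip_rows state threaded through the loop over range(1, n_threads-1)
def distribute_rows (n_rows : Int) (n_threads : Int) : List (List (Option Int)) :=
  let reading_info : List (List (Option Int)) := []
  let skip_rows : Int := 1
  let reading_info := reading_info ++ [[some (n_rows - skip_rows), some skip_rows]]
  let skip_rows := n_rows
  let st := (PySem.List.pyRange 1 (n_threads - 1) 1).foldl
    (fun (st : List (List (Option Int)) × Int) (_ : Int) =>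
      (st.1 ++ [[some n_rows, some st.2]], st.2 + n_rows))
    (reading_info, skip_rows)
  st.1 ++ [[none, some st.2]]

-- ===== PORT B =====
-- the 'while t > 1' countdown loop of Source B (state: t, skip, out)
def drAltLoop (n_rows : Int) (t : Int) (skip : Int) (out : List (List (Option Int))) :
    List (List (Option Int)) :=
  if _h : 1 < t then
    drAltLoop n_rows (t - 1) (skip - n_rows) (out ++ [[some n_rows, some (skip - n_rows)]])
  else out
termination_by (t - 1).toNat
decreasing_by omega

def distribute_rows_alt (n_rows : Int) (n_threads : Int) : List (List (Option Int)) :=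
  let t := max (n_threads - 1) 1
  let skip := n_rows * t
  let out : List (List (Option Int)) := [[none, some skip]]
  let out := drAltLoop n_rows t skip out
  let out := out ++ [[some (n_rows - 1), some 1]]
  out.reverse

-- ===== PRECONDITION & SPEC =====
def Spec_distribute_rows (n_rows : Int) (n_threads : Int) (out : List (List (Option Int))) : Prop := out = distribute_rows_alt n_rows n_threads
instance (n_rows : Int) (n_threads : Int) (out : List (List (Option Int))) : Decidable (Spec_distribute_rows n_rows n_threads out) := by unfold Spec_distribute_rows; infer_instance

-- ===== CLAIM (what is proved, stated in full; the proofs are below) =====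
def Claim_equal_distribute_rows : Prop := ∀ (n_rows : Int) (n_threads : Int), Dom_distribute_rows n_rows n_threads → Spec_distribute_rows n_rows n_threads (distribute_rows n_rows n_threads)

-- ===== LEMMAS AND PROOFS =====

-- A's loop invariant: folding from skip = a*n_rows over range(a,b) appends offsets i*n_rows and ends at (max a b)*n_rows
theorem loop_closed_form (n_rows : Int) : ∀ (n : Nat) (a b : Int), (b - a).toNat = n →
    ∀ (acc : List (List (Option Int))),
    (PySem.List.pyRange a b 1).foldl
      (fun (st : List (List (Option Int)) × Int) (_ : Int) =>
        (st.1 ++ [[some n_rows, some st.2]], st.2 + n_rows))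
      (acc, a * n_rows)
    = (acc ++ (PySem.List.pyRange a b 1).map (fun i => [some n_rows, some (i * n_rows)]),
       (max a b) * n_rows) := by
  intro n
  induction n with
  | zero =>
    intro a b h acc
    have hba : b ≤ a := by omega
    rw [PySem.List.pyRange_one_eq_nil hba]
    simp [max_eq_left hba]
  | succ k ih =>
    intro a b h acc
    have hab : a < b := by omega
    rw [PySem.List.pyRange_one_cons hab]
    simp only [List.foldl_cons, List.map_cons]
    have hk : (b - (a + 1)).toNat = k := by omega
    have := ih (a + 1) b hk (acc ++ [[some n_rows, some (a * n_rows)]])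
    rw [show a * n_rows + n_rows = (a + 1) * n_rows by ring] at *
    rw [this]
    have : max (a + 1) b = max a b := by omega
    rw [this]
    simp

-- B's countdown loop, started at skip = n_rows*t, appends the middle offsets in DESCENDING order
theorem drAltLoop_closed_form (n_rows : Int) : ∀ (n : Nat) (t : Int), (t - 1).toNat = n →
    ∀ (out : List (List (Option Int))),
    drAltLoop n_rows t (n_rows * t) out
    = out ++ ((PySem.List.pyRange 1 t 1).map (fun i => [some n_rows, some (i * n_rows)])).reverse := by
  intro n
  induction n with
  | zero =>
    intro t h out
    have ht : t ≤ 1 := by omega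
    rw [drAltLoop, PySem.List.pyRange_one_eq_nil ht]
    simp [show ¬ (1 < t) by omega]
  | succ k ih =>
    intro t h out
    have ht : 1 < t := by omega
    rw [drAltLoop]
    simp only [ht, dif_pos]
    have hk : (t - 1 - 1).toNat = k := by omega
    rw [show n_rows * t - n_rows = n_rows * (t - 1) by ring]
    rw [ih (t - 1) hk]
    have hr : PySem.List.pyRange 1 t 1 = PySem.List.pyRange 1 (t - 1) 1 ++ [t - 1] := by
      have := PySem.List.pyRange_one_succ_right (a := 1) (b := t - 1) (by omega)
      simpa using this
    rw [hr]
    simp [mul_comm]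

-- ===== VERDICT (by name: the statement is the Claim_ definition above) =====
theorem distribute_rows_spec : Claim_equal_distribute_rows := by
  intro n_rows n_threads _
  unfold Spec_distribute_rows distribute_rows distribute_rows_alt
  simp only [List.nil_append]
  -- A side
  have hA := loop_closed_form n_rows (n_threads - 1 - 1).toNat 1 (n_threads - 1) rfl
    [[some (n_rows - 1), some 1]]
  rw [one_mul] at hA
  rw [hA]
  -- B side
  set t := max (n_threads - 1) 1 with ht
  have hB := drAltLoop_closed_form n_rows (t - 1).toNat t rfl [[none, some (n_rows * t)]]
  rw [hB]
  have hrange : PySem.List.pyRange 1 t 1 = PySem.List.pyRange 1 (n_threads - 1) 1 := by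
    rcases le_or_gt n_threads 2 with h | h
    · rw [PySem.List.pyRange_one_eq_nil (by omega), PySem.List.pyRange_one_eq_nil (by omega)]
    · congr 1; omega
  have hmax : max 1 (n_threads - 1) = t := by omega
  rw [hrange, hmax, mul_comm n_rows t]
  simp

-- ===== end =====
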